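-- pv_equiv track=rewrite | github.com/100rd/Omniscience | packages/connectors/src/omniscience_connectors/database/formatter.py | _constraint_cols
-- ===== SOURCE A (Python) =====
-- def _constraint_cols(
--     constraints: list[dict[str, object]],
--     ctype: str,
-- ) -> dict[str, list[str]]:
--     """Group column names by constraint name for the given constraint type.
--
--     For PRIMARY KEY we collapse all names into the special key ``"__pk__"``.
--     For UNIQUE we key by constraint name.
--     """
--     result: dict[str, list[str]] = {}
--     for c in constraints:
--         if str(c.get("constraint_type", "")) != ctype:
--             continue
--         name = str(c.get("constraint_name", "__pk__"))
--         col = str(c.get("column_name", ""))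
--         key = "__pk__" if ctype == "PRIMARY KEY" else name
--         result.setdefault(key, []).append(col)
--     return result
-- ===== SOURCE B (Python) =====
-- def _constraint_cols(
--     constraints: list[dict[str, object]],
--     ctype: str,
-- ) -> dict[str, list[str]]:
--     """Group column names by constraint name for the given constraint type.
--
--     Two-pass decomposition: first collect the (key, column) pairs, then
--     build the dict from the first-occurrence-ordered distinct keys.
--     """
--     pairs = [
--         ("__pk__" if ctype == "PRIMARY KEY" else str(c.get("constraint_name", "__pk__")),
--          str(c.get("column_name", "")))
--         for c in constraints
--         if str(c.get("constraint_type", "")) == ctype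
--     ]
--     keys = list(dict.fromkeys(k for k, _ in pairs))
--     return {k: [col for kk, col in pairs if kk == k] for k in keys}
-- ===== Notes on version B (the rewrite author's own statement) =====
-- stated objective: alternative
-- what changed: Replaces A's single-pass dict accumulation with setdefault/append by a two-pass decomposition: build the filtered (key, column) pair list, deduplicate the keys in first-occurrence order, then construct each group by a per-key scan of the pair list.
import Mathlib
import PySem

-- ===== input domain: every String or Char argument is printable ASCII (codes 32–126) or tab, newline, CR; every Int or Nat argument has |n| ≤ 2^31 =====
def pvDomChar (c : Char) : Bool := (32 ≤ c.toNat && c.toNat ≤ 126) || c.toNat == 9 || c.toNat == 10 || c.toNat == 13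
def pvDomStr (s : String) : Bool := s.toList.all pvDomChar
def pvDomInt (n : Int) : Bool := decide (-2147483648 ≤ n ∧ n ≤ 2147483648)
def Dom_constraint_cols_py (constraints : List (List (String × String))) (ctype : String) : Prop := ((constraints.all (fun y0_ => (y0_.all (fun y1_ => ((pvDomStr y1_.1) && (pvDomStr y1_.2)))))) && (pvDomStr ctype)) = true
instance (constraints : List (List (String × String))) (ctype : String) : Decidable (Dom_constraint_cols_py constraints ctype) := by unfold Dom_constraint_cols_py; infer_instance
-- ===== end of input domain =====

-- B replaces A's single-pass dict accumulation by a two-pass decomposition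
-- (collect (key, col) pairs, then group by the deduplicated key list); objective: alternative.

-- ===== PORT A =====
-- single loop: setdefault(key, []).append(col)  ==  d.modify key [] (· ++ [col])
def constraint_cols_py (constraints : List (List (String × String))) (ctype : String) : List (String × List String) :=
  (constraints.foldl (fun result c =>
      if ((PySem.Dict.mk c).getD "constraint_type" "") ≠ ctype then result
      else
        let name := (PySem.Dict.mk c).getD "constraint_name" "__pk__"
        let col  := (PySem.Dict.mk c).getD "column_name" ""
        let key  := if ctype == "PRIMARY KEY" then "__pk__" else name
        result.modify key [] (· ++ [col]))
    (PySem.Dict.empty : PySem.Dict String (List String))).items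

-- ===== PORT B =====
-- the (key, col) pair comprehension of Source B
def pvPairs (constraints : List (List (String × String))) (ctype : String) : List (String × String) :=
  constraints.filterMap (fun c =>
    if ((PySem.Dict.mk c).getD "constraint_type" "") == ctype then
      some ((if ctype == "PRIMARY KEY" then "__pk__"
             else (PySem.Dict.mk c).getD "constraint_name" "__pk__"),
            (PySem.Dict.mk c).getD "column_name" "")
    else none)

def constraint_cols_py_alt (constraints : List (List (String × String))) (ctype : String) : List (String × List String) :=
  let pairs := pvPairs constraints ctype
  let keys := PySem.List.dedup (pairs.map (·.1))
  keys.map (fun k => (k, (pairs.filter (fun p => p.1 == k)).map (·.2)))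

-- ===== PRECONDITION & SPEC =====
def Spec_constraint_cols_py (constraints : List (List (String × String))) (ctype : String) (out : List (String × List String)) : Prop := out = constraint_cols_py_alt constraints ctype
instance (constraints : List (List (String × String))) (ctype : String) (out : List (String × List String)) : Decidable (Spec_constraint_cols_py constraints ctype out) := by unfold Spec_constraint_cols_py; infer_instance

-- ===== CLAIM (what is proved, stated in full; the proofs are below) =====
def Claim_equal_constraint_cols_py : Prop := ∀ (constraints : List (List (String × String))) (ctype : String), Dom_constraint_cols_py constraints ctype → Spec_constraint_cols_py constraints ctype (constraint_cols_py constraints ctype)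

-- ===== LEMMAS AND PROOFS =====

-- A's loop over constraints is the modify-append loop over the pair list
theorem pvFoldl_eq (ctype : String) (cs : List (List (String × String)))
    (d : PySem.Dict String (List String)) :
    cs.foldl (fun result c =>
      if ((PySem.Dict.mk c).getD "constraint_type" "") ≠ ctype then result
      else
        let name := (PySem.Dict.mk c).getD "constraint_name" "__pk__"
        let col  := (PySem.Dict.mk c).getD "column_name" ""
        let key  := if ctype == "PRIMARY KEY" then "__pk__" else name
        result.modify key [] (· ++ [col])) d
    = (pvPairs cs ctype).foldl (fun d p => d.modify p.1 [] (· ++ [p.2])) d := by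
  induction cs generalizing d with
  | nil => rfl
  | cons c cs ih =>
    by_cases h : ((PySem.Dict.mk c).getD "constraint_type" "") = ctype <;>
      simp [pvPairs, h] <;> simpa [pvPairs] using ih _

theorem constraint_cols_py_spec' (constraints : List (List (String × String))) (ctype : String) :
    constraint_cols_py constraints ctype = constraint_cols_py_alt constraints ctype := by
  unfold constraint_cols_py constraint_cols_py_alt
  rw [pvFoldl_eq]
  set ps := pvPairs constraints ctype with hps
  have hnd : ((ps.foldl (fun d p => d.modify p.1 [] (· ++ [p.2]))
      (PySem.Dict.empty : PySem.Dict String (List String))).keys).Nodup := by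
    exact PySem.Dict.nodup_keys_foldl_modify_key ps (·.1) [] (fun d p => (· ++ [p.2]))
      PySem.Dict.empty (by simp [pysem])
  rw [PySem.Dict.items_eq_map_keys _ hnd []]
  have hkeys : (ps.foldl (fun d p => d.modify p.1 [] (· ++ [p.2]))
      (PySem.Dict.empty : PySem.Dict String (List String))).keys
      = PySem.List.dedup (ps.map (·.1)) := by
    rw [PySem.Dict.keys_foldl_modify_key]
    simp [pysem, PySem.Set.update_nil_left]
  rw [hkeys]
  apply List.map_congr_left
  intro k hk
  rw [PySem.Dict.getD_foldl_modify_append]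
  simp [pysem]

-- ===== VERDICT (by name: the statement is the Claim_ definition above) =====
theorem constraint_cols_py_spec : Claim_equal_constraint_cols_py := by
  intro constraints ctype _
  unfold Spec_constraint_cols_py
  exact constraint_cols_py_spec' constraints ctype
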